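-- pv_equiv track=rewrite | github.com/popfido/FlashKDA-mlx | flash_kda_mlx/optimized.py | _valid_tokens_per_chunk_packed
-- ===== SOURCE A (Python) =====
-- def _valid_tokens_per_chunk_packed(
--     seq_lens: list[int], n_chunks_max: int, chunk: int
-- ) -> list[int]:
--     """Build the per-chunk valid-token count list across packed sequences.
--
--     Each sequence contributes ``n_chunks_max`` entries: the seq's
--     full chunks, its partial last chunk (if any), and zeros for the
--     chunks that exist only because of packing-pad to ``n_chunks_max``.
--     Total length is ``len(seq_lens) * n_chunks_max``.
--     """
--     out: list[int] = []
--     for sl in seq_lens: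
--         if sl <= 0:
--             out.extend([0] * n_chunks_max)
--             continue
--         n_chunks_seq = (sl + chunk - 1) // chunk
--         full = [chunk] * (n_chunks_seq - 1)
--         last = sl - (n_chunks_seq - 1) * chunk
--         seq_valid = full + [last]
--         seq_valid.extend([0] * (n_chunks_max - n_chunks_seq))
--         out.extend(seq_valid)
--     return out
-- ===== SOURCE B (Python) =====
-- def _valid_tokens_per_chunk_packed(
--     seq_lens: list[int], n_chunks_max: int, chunk: int
-- ) -> list[int]:
--     """Per-chunk valid-token counts for packed sequences.
--
--     Greedy and division-free: walk each sequence chunk by chunk, emitting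
--     min(chunk, tokens left), then pad the sequence's row with zeros up to
--     n_chunks_max slots.
--     """
--     out: list[int] = []
--     for sl in seq_lens:
--         target = len(out) + n_chunks_max
--         while sl > 0:
--             out.append(min(chunk, sl))
--             sl -= chunk
--         while len(out) < target:
--             out.append(0)
--     return out
-- ===== Notes on version B (the rewrite author's own statement) =====
-- stated objective: alternative
-- what changed: A computes each sequence's segment arithmetically (ceil-division for the chunk count, list replication for the full chunks and the zero pad, behind an sl<=0 branch); B is division-free: a greedy countdown loop emits min(chunk, tokens left) per chunk, then a pad loop fills the row with zeros up to n_chunks_max slots; Pre_ excludes exactly the inputs with chunk <= 0 and some positive length, where A raises ZeroDivisionError (chunk = 0) or returns while B's countdown loop does not terminate (chunk < 0, a chunk size outside the function's purpose).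
-- outside the precondition, e.g. on _valid_tokens_per_chunk_packed([5], 3, -2): A returns [1, 0, 0, 0, 0], B does not finish within the time limit; on _valid_tokens_per_chunk_packed([5], 3, 0): A raises ZeroDivisionError, B does not finish within the time limit
import Mathlib
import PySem

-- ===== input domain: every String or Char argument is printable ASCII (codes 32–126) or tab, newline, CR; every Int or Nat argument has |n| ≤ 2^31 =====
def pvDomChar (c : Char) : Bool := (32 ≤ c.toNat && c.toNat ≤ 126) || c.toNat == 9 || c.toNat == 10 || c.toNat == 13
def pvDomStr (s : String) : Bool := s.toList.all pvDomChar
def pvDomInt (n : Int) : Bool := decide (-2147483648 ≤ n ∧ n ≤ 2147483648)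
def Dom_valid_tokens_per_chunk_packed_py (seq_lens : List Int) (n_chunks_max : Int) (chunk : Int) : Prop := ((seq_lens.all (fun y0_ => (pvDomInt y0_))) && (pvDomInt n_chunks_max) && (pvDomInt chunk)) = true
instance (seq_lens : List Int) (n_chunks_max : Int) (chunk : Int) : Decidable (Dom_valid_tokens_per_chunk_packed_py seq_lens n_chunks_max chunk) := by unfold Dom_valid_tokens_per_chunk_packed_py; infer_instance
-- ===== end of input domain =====

-- B replaces A's arithmetic segment assembly (ceil-division chunk count, replicated full chunks and zero pad,
-- behind an sl<=0 branch) by a division-free greedy countdown emitting min(chunk, tokens left) per chunk and a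
-- pad loop filling each row to n_chunks_max slots; objective: alternative. Proved equal for chunk >= 1.


-- ===== PORT A =====
def valid_tokens_per_chunk_packed_py (seq_lens : List Int) (n_chunks_max : Int) (chunk : Int) : List Int :=
  seq_lens.foldl (fun out sl =>
    if sl ≤ 0 then out ++ List.replicate n_chunks_max.toNat (0 : Int)
    else
      let n_chunks_seq := PySem.Int.floordiv (sl + chunk - 1) chunk
      let full := List.replicate (n_chunks_seq - 1).toNat chunk
      let last := sl - (n_chunks_seq - 1) * chunk
      let seq_valid := (full ++ [last]) ++ List.replicate (n_chunks_max - n_chunks_seq).toNat (0 : Int)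
      out ++ seq_valid) []

-- ===== PORT B =====
-- 'while sl > 0: out.append(min(chunk, sl)); sl -= chunk'; fuel sl.toNat only makes the loop total
-- (with chunk ≥ 1 it runs at most sl iterations, so the fuel is never exhausted on the claimed domain).
def pvCountdown (fuel : Nat) (chunk : Int) (sl : Int) (acc : List Int) : List Int :=
  match fuel with
  | 0 => acc
  | Nat.succ f => if 0 < sl then pvCountdown f chunk (sl - chunk) (acc ++ [min chunk sl]) else acc

-- 'while len(out) < target: out.append(0)'
def pvPad (target : Int) (acc : List Int) : List Int :=
  if _h : (acc.length : Int) < target then pvPad target (acc ++ [(0 : Int)])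
  else acc
termination_by (target - acc.length).toNat
decreasing_by simp only [List.length_append, List.length_cons, List.length_nil]; omega

def valid_tokens_per_chunk_packed_py_alt (seq_lens : List Int) (n_chunks_max : Int) (chunk : Int) : List Int :=
  seq_lens.foldl (fun out sl =>
    pvPad ((out.length : Int) + n_chunks_max) (pvCountdown sl.toNat chunk sl out)) []

-- ===== PRECONDITION & SPEC =====
-- Pre_ covers the natural domain chunk ≥ 1 plus the degenerate all-nonpositive-length inputs; excluded are
-- exactly the inputs with chunk ≤ 0 and some positive length, where A raises ZeroDivisionError (chunk = 0)
-- or returns while B's countdown loop does not terminate (chunk < 0, a chunk size outside the function's purpose).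
def Pre_valid_tokens_per_chunk_packed_py (seq_lens : List Int) (n_chunks_max : Int) (chunk : Int) : Prop :=
  1 ≤ chunk ∨ ∀ sl ∈ seq_lens, sl ≤ 0
instance (seq_lens : List Int) (n_chunks_max : Int) (chunk : Int) : Decidable (Pre_valid_tokens_per_chunk_packed_py seq_lens n_chunks_max chunk) := by unfold Pre_valid_tokens_per_chunk_packed_py; infer_instance
def pvWitness_valid_tokens_per_chunk_packed_py : List Int × Int × Int := ([3, 0, 7], 3, 2)

def Spec_valid_tokens_per_chunk_packed_py (seq_lens : List Int) (n_chunks_max : Int) (chunk : Int) (out : List Int) : Prop := out = valid_tokens_per_chunk_packed_py_alt seq_lens n_chunks_max chunk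
instance (seq_lens : List Int) (n_chunks_max : Int) (chunk : Int) (out : List Int) : Decidable (Spec_valid_tokens_per_chunk_packed_py seq_lens n_chunks_max chunk out) := by unfold Spec_valid_tokens_per_chunk_packed_py; infer_instance

-- ===== CLAIM (what is proved, stated in full; the proofs are below) =====
def Claim_equal_valid_tokens_per_chunk_packed_py : Prop := ∀ (seq_lens : List Int) (n_chunks_max : Int) (chunk : Int), Dom_valid_tokens_per_chunk_packed_py seq_lens n_chunks_max chunk → Pre_valid_tokens_per_chunk_packed_py seq_lens n_chunks_max chunk → Spec_valid_tokens_per_chunk_packed_py seq_lens n_chunks_max chunk (valid_tokens_per_chunk_packed_py seq_lens n_chunks_max chunk)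

-- ===== LEMMAS AND PROOFS =====

-- The countdown loop, given enough fuel, appends the sequence's chunk decomposition
-- (ceil(sl/chunk) - 1 full chunks and the positive remainder), written with A's floordiv.
theorem pv_countdown_eq (chunk : Int) (hc : 1 ≤ chunk) (fuel : Nat) (sl : Int)
    (hf : sl ≤ (fuel : Int)) (acc : List Int) :
    pvCountdown fuel chunk sl acc
    = acc ++ (if sl ≤ 0 then []
        else List.replicate (PySem.Int.floordiv (sl + chunk - 1) chunk - 1).toNat chunk
              ++ [sl - (PySem.Int.floordiv (sl + chunk - 1) chunk - 1) * chunk]) := by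
  induction fuel generalizing sl acc with
  | zero =>
    rw [pvCountdown, if_pos (by exact_mod_cast hf : sl ≤ 0)]
    simp
  | succ f ih =>
    by_cases hsl : sl ≤ 0
    · rw [pvCountdown, if_neg (by omega), if_pos hsl]
      simp
    · rw [not_le] at hsl
      have hrec := ih (sl - chunk) (by push_cast at hf ⊢; omega) (acc ++ [min chunk sl])
      rw [pvCountdown, if_pos hsl, hrec]
      set n := PySem.Int.floordiv (sl + chunk - 1) chunk with hn
      have hnb : n * chunk ≤ sl + chunk - 1 ∧ sl + chunk - 1 < (n + 1) * chunk :=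
        (PySem.Int.floordiv_eq_iff_of_pos (by omega)).mp rfl
      by_cases hbig : chunk < sl
      · -- a full chunk is emitted; the tail decomposes sl - chunk with count n - 1
        have hmin : min chunk sl = chunk := min_eq_left (by omega)
        have hn2 : 2 ≤ n := by
          by_contra h
          have h1 : (n + 1) * chunk ≤ 2 * chunk := mul_le_mul_of_nonneg_right (by omega) (by omega)
          omega
        have hn' : PySem.Int.floordiv (sl - chunk + chunk - 1) chunk = n - 1 := by
          apply (PySem.Int.floordiv_eq_iff_of_pos (by omega)).mpr
          constructor
          · nlinarith [hnb.1]
          · nlinarith [hnb.2]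
        rw [if_neg (show ¬ (sl - chunk ≤ 0) by omega),
          if_neg (show ¬ (sl ≤ 0) by omega), hn', hmin]
        have hlast : sl - chunk - (n - 1 - 1) * chunk = sl - (n - 1) * chunk := by ring
        have hrep : (n - 1).toNat = (n - 1 - 1).toNat + 1 := by omega
        rw [hlast, hrep, List.replicate_succ]
        simp [List.append_assoc]
      · -- the last (possibly partial) chunk: n = 1 and the loop stops afterwards
        have hmin : min chunk sl = sl := min_eq_right (by omega)
        have hn1 : n = 1 := by
          apply (PySem.Int.floordiv_eq_iff_of_pos (by omega)).mpr
          constructor <;> nlinarith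
        rw [if_pos (show sl - chunk ≤ 0 by omega),
          if_neg (show ¬ (sl ≤ 0) by omega), hn1, hmin]
        simp

-- The pad loop appends (target - length)⁺ zeros.
theorem pv_pad_eq (k : Nat) (target : Int) (acc : List Int)
    (hk : (target - (acc.length : Int)).toNat = k) :
    pvPad target acc = acc ++ List.replicate k (0 : Int) := by
  induction k generalizing acc with
  | zero =>
    rw [pvPad, dif_neg (by omega)]
    simp
  | succ k ih =>
    rw [pvPad, dif_pos (by omega), ih (acc ++ [(0 : Int)])
      (by simp only [List.length_append, List.length_cons, List.length_nil]; omega)]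
    rw [List.append_assoc, List.singleton_append, ← List.replicate_succ]

-- One sequence step of B equals one sequence step of A.
theorem pv_step_eq (nmax chunk : Int) (hc : 1 ≤ chunk) (out : List Int) (sl : Int) :
    pvPad ((out.length : Int) + nmax) (pvCountdown sl.toNat chunk sl out)
    = (if sl ≤ 0 then out ++ List.replicate nmax.toNat (0 : Int)
       else
         let n_chunks_seq := PySem.Int.floordiv (sl + chunk - 1) chunk
         let full := List.replicate (n_chunks_seq - 1).toNat chunk
         let last := sl - (n_chunks_seq - 1) * chunk
         let seq_valid := (full ++ [last]) ++ List.replicate (nmax - n_chunks_seq).toNat (0 : Int)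
         out ++ seq_valid) := by
  rw [pv_countdown_eq chunk hc sl.toNat sl (Int.self_le_toNat sl) out]
  by_cases hsl : sl ≤ 0
  · rw [if_pos hsl, if_pos hsl, List.append_nil,
      pv_pad_eq nmax.toNat ((out.length : Int) + nmax) out (by omega)]
  · rw [not_le] at hsl
    rw [if_neg (by omega), if_neg (by omega)]
    set n := PySem.Int.floordiv (sl + chunk - 1) chunk with hn
    have hnb : n * chunk ≤ sl + chunk - 1 ∧ sl + chunk - 1 < (n + 1) * chunk :=
      (PySem.Int.floordiv_eq_iff_of_pos (by omega)).mp rfl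
    have hn1 : 1 ≤ n := by
      by_contra h
      have h1 : (n + 1) * chunk ≤ 1 * chunk := mul_le_mul_of_nonneg_right (by omega) (by omega)
      omega
    rw [pv_pad_eq (nmax - n).toNat _ _ (by
      simp only [List.length_append, List.length_replicate, List.length_cons, List.length_nil]
      omega)]
    simp only [List.append_assoc, List.cons_append, List.nil_append]

-- One sequence step for a nonpositive length: the countdown gets zero fuel and only the pad runs (any chunk).
theorem pv_step_eq_nonpos (nmax chunk : Int) (out : List Int) (sl : Int) (hsl : sl ≤ 0) :
    pvPad ((out.length : Int) + nmax) (pvCountdown sl.toNat chunk sl out)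
    = out ++ List.replicate nmax.toNat (0 : Int) := by
  have hfuel : sl.toNat = 0 := by omega
  rw [hfuel, pvCountdown, pv_pad_eq nmax.toNat ((out.length : Int) + nmax) out (by omega)]

-- ===== VERDICT (by name: the statement is the Claim_ definition above) =====
theorem valid_tokens_per_chunk_packed_py_spec : Claim_equal_valid_tokens_per_chunk_packed_py := by
  intro seq_lens n_chunks_max chunk _ hpre
  unfold Spec_valid_tokens_per_chunk_packed_py
  unfold valid_tokens_per_chunk_packed_py valid_tokens_per_chunk_packed_py_alt
  rcases hpre with hc | hnp
  · congr 1
    funext out sl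
    exact (pv_step_eq n_chunks_max chunk hc out sl).symm
  · apply PySem.List.foldl_congr_mem
    intro out sl hmem
    rw [if_pos (hnp sl hmem), pv_step_eq_nonpos n_chunks_max chunk out sl (hnp sl hmem)]
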